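-- pv_equiv track=rewrite | github.com/yongchao98/CodeSteer-v1.0 | create_dataset/create_dataset_2048.py | validate_llm_answer
-- ===== SOURCE A (Python) =====
-- def validate_llm_answer(answer: str, expected: str) -> bool:
--     """Validate LLM's answer against expected solution"""
--     try:
--         # Extract content between <<< and >>>
--         start_idx = answer.find('<<<')
--         end_idx = answer.find('>>>')
--         if start_idx == -1 or end_idx == -1:
--             return False
--
--         content = answer[start_idx + 3:end_idx].strip()
--
--         # Normalize both strings by removing extra whitespace and standardizing separators
--         def normalize_grid_string(s: str) -> str:
--             lines = s.strip().split('\n')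
--             normalized_lines = []
--             for line in lines:
--                 numbers = [n.strip() for n in line.split(',')]
--                 normalized_lines.append(', '.join(numbers))
--             return '\n'.join(normalized_lines)
--
--         normalized_content = normalize_grid_string(content)
--         normalized_expected = normalize_grid_string(expected)
--
--         return normalized_content == normalized_expected
--     except:
--         return False
-- ===== SOURCE B (Python) =====
-- def _canon(s: str) -> str:
--     # single pass state machine: output, pending whitespace run, in-token flag
--     out = []
--     ws = ''
--     in_tok = False
--     for c in s.strip():
--         if c == '\n':
--             out.append('\n')
--             ws = ''
--             in_tok = False
--         elif c == ',':
--             out.append(', ')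
--             ws = ''
--             in_tok = False
--         elif c.isspace():
--             ws += c
--         else:
--             if in_tok:
--                 out.append(ws)
--             out.append(c)
--             ws = ''
--             in_tok = True
--     return ''.join(out)
--
-- def validate_llm_answer(answer: str, expected: str) -> bool:
--     start_idx = answer.find('<<<')
--     end_idx = answer.find('>>>')
--     if start_idx == -1 or end_idx == -1:
--         return False
--     content = answer[start_idx + 3:end_idx].strip()
--     return _canon(content) == _canon(expected)
-- ===== Notes on version B (the rewrite author's own statement) =====
-- stated objective: alternative
-- what changed: A normalizes each string by staged passes (strip, split into lines, split each line on ',', strip every token, re-join with ', ' and '\n') and compares the results; B builds the canonical string in a single left-to-right character scan with a three-field state machine (output, pending-whitespace buffer, in-token flag), so no intermediate line/token lists are ever materialized.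
import Mathlib
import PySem

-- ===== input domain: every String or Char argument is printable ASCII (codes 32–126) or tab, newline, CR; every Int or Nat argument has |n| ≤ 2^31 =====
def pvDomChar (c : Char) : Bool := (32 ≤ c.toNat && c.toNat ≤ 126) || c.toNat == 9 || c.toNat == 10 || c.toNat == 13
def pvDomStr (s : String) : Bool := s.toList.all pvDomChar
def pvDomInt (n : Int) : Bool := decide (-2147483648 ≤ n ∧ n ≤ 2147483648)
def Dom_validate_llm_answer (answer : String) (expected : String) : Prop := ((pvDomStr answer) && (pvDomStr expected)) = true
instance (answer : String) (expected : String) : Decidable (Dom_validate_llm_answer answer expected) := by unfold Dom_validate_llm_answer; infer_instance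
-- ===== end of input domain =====

-- B replaces A's staged normalization (strip, split into lines, split each line on ',', strip
-- each token, re-join with ', ' and '\n') by a single left-to-right character scan with a small
-- state machine (output, pending-whitespace buffer, in-token flag); same values everywhere,
-- no speed claim.  (A's try/except body cannot raise, so both ports are total.)

-- ===== PORT A =====
-- A's inner helper `normalize_grid_string`: strip, split into lines, per line split on ',',
-- strip each token, re-join with ', ', finally re-join the lines with '\n'.
def pvNormalizeA (s : List Char) : List Char :=
  let lines := PySem.Chars.splitOn (PySem.Chars.strip s) ['\n']
  let normalized_lines := lines.foldl
    (fun acc line =>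
      acc ++ [PySem.Chars.join [',', ' ']
        ((PySem.Chars.splitOn line [',']).map (fun n => PySem.Chars.strip n))]) []
  PySem.Chars.join ['\n'] normalized_lines

def validate_llm_answer (answer : String) (expected : String) : Bool :=
  let start_idx := PySem.Str.find answer "<<<"
  let end_idx := PySem.Str.find answer ">>>"
  if start_idx == -1 || end_idx == -1 then false
  else
    let content := PySem.Chars.strip
      (PySem.List.slice answer.toList (some (start_idx + 3)) (some end_idx))
    pvNormalizeA content == pvNormalizeA expected.toList

-- ===== PORT B =====
-- B's `_canon` loop body: state = (out, ws, in_tok), exactly the Python branch order.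
def pvCanonStep (st : List Char × List Char × Bool) (c : Char) : List Char × List Char × Bool :=
  if c == '\n' then (st.1 ++ ['\n'], [], false)
  else if c == ',' then (st.1 ++ [',', ' '], [], false)
  else if PySem.Chars.isspace c then (st.1, st.2.1 ++ [c], st.2.2)
  else (st.1 ++ (if st.2.2 then st.2.1 else []) ++ [c], [], true)

-- B's `_canon`: one pass over s.strip(), then the accumulated output.
def pvCanon (s : List Char) : List Char :=
  ((PySem.Chars.strip s).foldl pvCanonStep ([], [], false)).1

def validate_llm_answer_alt (answer : String) (expected : String) : Bool :=
  let start_idx := PySem.Str.find answer "<<<"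
  let end_idx := PySem.Str.find answer ">>>"
  if start_idx == -1 || end_idx == -1 then false
  else
    let content := PySem.Chars.strip
      (PySem.List.slice answer.toList (some (start_idx + 3)) (some end_idx))
    pvCanon content == pvCanon expected.toList

-- ===== PRECONDITION & SPEC =====
def Spec_validate_llm_answer (answer : String) (expected : String) (out : Bool) : Prop := out = validate_llm_answer_alt answer expected
instance (answer : String) (expected : String) (out : Bool) : Decidable (Spec_validate_llm_answer answer expected out) := by unfold Spec_validate_llm_answer; infer_instance

-- ===== CLAIM (what is proved, stated in full; the proofs are below) =====
def Claim_equal_validate_llm_answer : Prop := ∀ (answer : String) (expected : String), Dom_validate_llm_answer answer expected → Spec_validate_llm_answer answer expected (validate_llm_answer answer expected)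

-- ===== LEMMAS AND PROOFS =====

-- A's loop `normalized_lines.append(...)` as a map.
theorem pv_foldl_push {α β : Type} (f : α → β) :
    ∀ (l : List α) (init : List β),
      l.foldl (fun acc x => acc ++ [f x]) init = init ++ l.map f := by
  intro l
  induction l with
  | nil => simp
  | cons x xs ih => intro init; simp [List.foldl, ih]

-- PySem.Chars.splitOn with a single-character separator is Lean's List.splitOn.
theorem pv_splitOn_go_spec (c : Char) :
    ∀ (fuel : Nat) (l cur : List Char) (acc : List (List Char)), l.length < fuel →
      PySem.Chars.splitOn.go [c] fuel l cur acc =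
        acc.reverse ++ (l.splitOn c).modifyHead (fun p => cur.reverse ++ p) := by
  intro fuel
  induction fuel with
  | zero => intro l cur acc h; omega
  | succ f ih =>
    intro l cur acc h
    cases l with
    | nil =>
      simp [PySem.Chars.splitOn.go, List.splitOn, List.splitOnP_nil]
    | cons x rest =>
      obtain ⟨hd, tl, heq⟩ := List.exists_cons_of_ne_nil (List.splitOnP_ne_nil (· == c) rest)
      have hlen : rest.length < f := by simp at h; omega
      simp only [PySem.Chars.splitOn.go, List.isPrefixOf, List.splitOn, List.splitOnP_cons,
        List.length_cons, List.drop_succ_cons, List.length_nil, List.drop_zero, Bool.and_true]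
      by_cases hx : x = c
      · subst hx
        simp only [beq_self_eq_true, if_true]
        rw [ih rest [] (cur.reverse :: acc) hlen]
        simp [List.splitOn, heq]
      · have h1 : (c == x) = false := by simp [Ne.symm hx]
        have h2 : (x == c) = false := by simp [hx]
        simp only [h1, h2, Bool.false_eq_true, if_false]
        rw [ih rest (x :: cur) acc hlen]
        simp [List.splitOn, heq]

theorem pv_splitOn_eq (s : List Char) (c : Char) :
    PySem.Chars.splitOn s [c] = s.splitOn c := by
  show PySem.Chars.splitOn.go [c] (s.length + 1) s [] [] = _
  rw [pv_splitOn_go_spec c (s.length + 1) s [] [] (by omega)]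
  obtain ⟨hd, tl, heq⟩ := List.exists_cons_of_ne_nil (List.splitOnP_ne_nil (· == c) s)
  simp [List.splitOn, heq]

theorem pv_intercalate_cons₂ {α : Type} (sep a b : List α) (l : List (List α)) :
    sep.intercalate (a :: b :: l) = a ++ sep ++ sep.intercalate (b :: l) := by
  simp [List.intercalate, List.intersperse_cons₂, List.append_assoc]

theorem pv_intercalate_cons_append {α : Type} (sep x y : List α) (l : List (List α)) :
    sep.intercalate ((x ++ y) :: l) = x ++ sep.intercalate (y :: l) := by
  cases l with
  | nil => simp [List.intercalate]
  | cons b t => rw [pv_intercalate_cons₂, pv_intercalate_cons₂]; simp [List.append_assoc]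

-- the common normal form both proofs are pushed to (Lean's List.splitOn / List.intercalate)
def pvLineC (line : List Char) : List Char :=
  List.intercalate [',', ' '] ((line.splitOn ',').map PySem.Chars.strip)

def pvC (t : List Char) : List Char :=
  List.intercalate ['\n'] ((t.splitOn '\n').map pvLineC)

theorem pv_norm_eq_C (s : List Char) :
    pvNormalizeA s = pvC (PySem.Chars.strip s) := by
  unfold pvNormalizeA pvC pvLineC
  dsimp only
  rw [pv_foldl_push]
  simp only [List.nil_append, pv_splitOn_eq]
  rfl

-- splitOn facts
theorem pv_splitOn_append (c : Char) :
    ∀ (u r : List Char), c ∉ u →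
      (u ++ r).splitOn c = (r.splitOn c).modifyHead (fun p => u ++ p) := by
  intro u
  induction u with
  | nil =>
    intro r _
    obtain ⟨hd, tl, heq⟩ := List.exists_cons_of_ne_nil (List.splitOnP_ne_nil (· == c) r)
    simp [List.splitOn] at heq ⊢
    simp [heq]
  | cons a u' ih =>
    intro r hmem
    simp only [List.mem_cons] at hmem
    have ha : (a == c) = false := by
      simp only [beq_eq_false_iff_ne, ne_eq]
      exact fun hh => hmem (Or.inl hh.symm)
    show List.splitOnP (· == c) (a :: (u' ++ r)) = _
    rw [List.splitOnP_cons]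
    simp only [ha, Bool.false_eq_true, if_false]
    have := ih r (fun h => hmem (Or.inr h))
    simp only [List.splitOn] at this
    rw [this, List.modifyHead_modifyHead]
    rfl

theorem pv_splitOn_nosep (c : Char) (u : List Char) (h : c ∉ u) :
    u.splitOn c = [u] := by
  have := pv_splitOn_append c u [] h
  simpa [List.splitOn, List.splitOnP_nil] using this

theorem pv_splitOn_sep (c : Char) (u r : List Char) (h : c ∉ u) :
    (u ++ c :: r).splitOn c = u :: r.splitOn c := by
  rw [pv_splitOn_append c u (c :: r) h]
  show ((List.splitOnP (· == c) (c :: r)).modifyHead _) = _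
  rw [List.splitOnP_cons]
  simp [List.splitOn]

-- pvC unfolding along the first token (u free of ',' and '\n')
theorem pv_C_nosep (u : List Char) (h : ∀ a ∈ u, (a == ',' || a == '\n') = false) :
    pvC u = PySem.Chars.strip u := by
  have hnl : '\n' ∉ u := fun hm => by simpa using h _ hm
  have hcm : ',' ∉ u := fun hm => by simpa using h _ hm
  unfold pvC
  rw [pv_splitOn_nosep _ _ hnl]
  have hl : pvLineC u = PySem.Chars.strip u := by
    unfold pvLineC
    rw [pv_splitOn_nosep _ _ hcm]
    simp [List.intercalate]
  simp only [List.map_cons, List.map_nil, hl]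
  simp [List.intercalate]

theorem pv_C_comma (u r : List Char) (h : ∀ a ∈ u, (a == ',' || a == '\n') = false) :
    pvC (u ++ ',' :: r) = PySem.Chars.strip u ++ ',' :: ' ' :: pvC r := by
  have hnl : '\n' ∉ u ++ [','] := by
    intro hm
    rcases List.mem_append.mp hm with hm | hm
    · simpa using h _ hm
    · simp at hm
  have hcm : ',' ∉ u := fun hm => by simpa using h _ hm
  obtain ⟨l0, ls, hls⟩ := List.exists_cons_of_ne_nil (List.splitOnP_ne_nil (· == '\n') r)
  have hls : r.splitOn '\n' = l0 :: ls := hls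
  obtain ⟨t0, ts, hts⟩ := List.exists_cons_of_ne_nil (List.splitOnP_ne_nil (· == ',') l0)
  have hts : l0.splitOn ',' = t0 :: ts := hts
  have hsplit : (u ++ ',' :: r).splitOn '\n' = (u ++ ',' :: l0) :: ls := by
    have : u ++ ',' :: r = (u ++ [',']) ++ r := by simp
    rw [this, pv_splitOn_append '\n' (u ++ [',']) r hnl, hls]
    simp
  unfold pvC
  rw [hsplit, hls]
  have hline : pvLineC (u ++ ',' :: l0) = PySem.Chars.strip u ++ [',', ' '] ++ pvLineC l0 := by
    unfold pvLineC
    rw [pv_splitOn_sep ',' u l0 hcm, hts]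
    simp only [List.map_cons]
    rw [pv_intercalate_cons₂]
  rw [List.map_cons, hline]
  have : (PySem.Chars.strip u ++ [',', ' ']) ++ pvLineC l0 = PySem.Chars.strip u ++ [',', ' '] ++ pvLineC l0 := by simp
  rw [← this, pv_intercalate_cons_append]
  simp [List.map_cons]

theorem pv_C_nl (u r : List Char) (h : ∀ a ∈ u, (a == ',' || a == '\n') = false) :
    pvC (u ++ '\n' :: r) = PySem.Chars.strip u ++ '\n' :: pvC r := by
  have hnl : '\n' ∉ u := fun hm => by simpa using h _ hm
  have hcm : ',' ∉ u := fun hm => by simpa using h _ hm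
  obtain ⟨l0, ls, hls⟩ := List.exists_cons_of_ne_nil (List.splitOnP_ne_nil (· == '\n') r)
  have hls : r.splitOn '\n' = l0 :: ls := hls
  unfold pvC
  rw [pv_splitOn_sep '\n' u r hnl, hls, List.map_cons, List.map_cons]
  have hline : pvLineC u = PySem.Chars.strip u := by
    unfold pvLineC
    rw [pv_splitOn_nosep ',' u hcm]
    simp [List.intercalate]
  rw [hline, pv_intercalate_cons₂]
  simp

-- whitespace-run helpers
theorem pv_rev_dropWhile_nil_iff (p : Char → Bool) (u : List Char) :
    u.reverse.dropWhile p = [] ↔ u.dropWhile p = [] := by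
  simp only [List.dropWhile_eq_nil_iff, List.mem_reverse]

theorem pv_rstrip_cons_rest (c : Char) (u : List Char)
    (hnil : u.dropWhile PySem.Chars.isspace ≠ []) :
    PySem.Chars.rstrip (c :: u) = c :: PySem.Chars.rstrip u := by
  show ((c :: u).reverse.dropWhile PySem.Chars.isspace).reverse = _
  rw [List.reverse_cons, List.dropWhile_append]
  have h1 : u.reverse.dropWhile PySem.Chars.isspace ≠ [] :=
    fun h => hnil ((pv_rev_dropWhile_nil_iff _ _).mp h)
  simp only [List.isEmpty_iff, h1, if_false]
  rw [List.reverse_append]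
  rfl

theorem pv_rstrip_cons_allws (c : Char) (u : List Char)
    (hc : PySem.Chars.isspace c = false)
    (hnil : u.dropWhile PySem.Chars.isspace = []) :
    PySem.Chars.rstrip (c :: u) = [c] := by
  show ((c :: u).reverse.dropWhile PySem.Chars.isspace).reverse = _
  rw [List.reverse_cons, List.dropWhile_append]
  have h1 : u.reverse.dropWhile PySem.Chars.isspace = [] :=
    (pv_rev_dropWhile_nil_iff _ _).mpr hnil
  simp [h1, hc]

theorem pv_strip_cons_space (c : Char) (u : List Char)
    (hsp : PySem.Chars.isspace c = true) :
    PySem.Chars.strip (c :: u) = PySem.Chars.strip u := by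
  show PySem.Chars.rstrip ((c :: u).dropWhile PySem.Chars.isspace)
      = PySem.Chars.rstrip (u.dropWhile PySem.Chars.isspace)
  rw [List.dropWhile_cons_of_pos hsp]

theorem pv_strip_cons_nonspace (c : Char) (u : List Char)
    (hsp : PySem.Chars.isspace c = false) :
    PySem.Chars.strip (c :: u) = PySem.Chars.rstrip (c :: u) := by
  show PySem.Chars.rstrip ((c :: u).dropWhile PySem.Chars.isspace) = _
  rw [List.dropWhile_cons_of_neg (by simp [hsp])]

-- the machine on a separator-free block, starting mid-token (pending whitespace ws)
theorem pv_T2 (u : List Char) (h : ∀ a ∈ u, (a == ',' || a == '\n') = false) :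
    ∀ (out ws : List Char),
      (u.foldl pvCanonStep (out, ws, true)).1 =
        out ++ (if u.dropWhile PySem.Chars.isspace = [] then []
                else ws ++ PySem.Chars.rstrip u) := by
  induction u with
  | nil => intro out ws; simp [List.dropWhile]
  | cons c u' ih =>
    intro out ws
    have hc := h c List.mem_cons_self
    have hnl : (c == '\n') = false := by
      cases h' : (c == '\n') <;> simp [h'] at hc ⊢
    have hcm : (c == ',') = false := by
      cases h' : (c == ',') <;> simp [h'] at hc ⊢
    have h' := fun a ha => h a (List.mem_cons_of_mem _ ha)
    by_cases hsp : PySem.Chars.isspace c = true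
    · have hstep : pvCanonStep (out, ws, true) c = (out, ws ++ [c], true) := by
        simp [pvCanonStep, hnl, hcm, hsp]
      rw [List.foldl_cons, hstep, ih h' out (ws ++ [c])]
      by_cases hnil : u'.dropWhile PySem.Chars.isspace = []
      · simp [hnil, hsp]
      · rw [pv_rstrip_cons_rest c u' hnil]
        simp [hsp, hnil]
    · have hsp' : PySem.Chars.isspace c = false := by simpa using hsp
      have hstep : pvCanonStep (out, ws, true) c = (out ++ ws ++ [c], [], true) := by
        simp [pvCanonStep, hnl, hcm, hsp']
      rw [List.foldl_cons, hstep, ih h' (out ++ ws ++ [c]) []]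
      have hne : (c :: u').dropWhile PySem.Chars.isspace ≠ [] := by
        rw [List.dropWhile_cons_of_neg (by simp [hsp'])]; simp
      by_cases hnil : u'.dropWhile PySem.Chars.isspace = []
      · rw [pv_rstrip_cons_allws c u' hsp' hnil]
        simp [hne, hnil]
      · rw [pv_rstrip_cons_rest c u' hnil]
        simp [hne, hnil]

-- the machine on a separator-free block, starting at a token boundary
theorem pv_T1 (u : List Char) (h : ∀ a ∈ u, (a == ',' || a == '\n') = false) :
    ∀ (out ws : List Char),
      (u.foldl pvCanonStep (out, ws, false)).1 = out ++ PySem.Chars.strip u := by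
  induction u with
  | nil =>
    intro out ws
    have hs : PySem.Chars.strip ([] : List Char) = [] := rfl
    simp [hs]
  | cons c u' ih =>
    intro out ws
    have hc := h c List.mem_cons_self
    have hnl : (c == '\n') = false := by
      cases h' : (c == '\n') <;> simp [h'] at hc ⊢
    have hcm : (c == ',') = false := by
      cases h' : (c == ',') <;> simp [h'] at hc ⊢
    have h' := fun a ha => h a (List.mem_cons_of_mem _ ha)
    by_cases hsp : PySem.Chars.isspace c = true
    · have hstep : pvCanonStep (out, ws, false) c = (out, ws ++ [c], false) := by
        simp [pvCanonStep, hnl, hcm, hsp]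
      rw [List.foldl_cons, hstep, ih h' out (ws ++ [c]), pv_strip_cons_space c u' hsp]
    · have hsp' : PySem.Chars.isspace c = false := by simpa using hsp
      have hstep : pvCanonStep (out, ws, false) c = (out ++ [c], [], true) := by
        simp [pvCanonStep, hnl, hcm, hsp']
      rw [List.foldl_cons, hstep, pv_T2 u' h' (out ++ [c]) [],
        pv_strip_cons_nonspace c u' hsp']
      by_cases hnil : u'.dropWhile PySem.Chars.isspace = []
      · rw [pv_rstrip_cons_allws c u' hsp' hnil]
        simp [hnil]
      · rw [pv_rstrip_cons_rest c u' hnil]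
        simp [hnil]

-- full machine run = the normal form pvC, by strong induction on the length
theorem pv_main : ∀ (n : Nat) (t : List Char), t.length ≤ n →
    ∀ (out : List Char), (t.foldl pvCanonStep (out, [], false)).1 = out ++ pvC t := by
  intro n
  induction n with
  | zero =>
    intro t ht out
    have ht0 : t = [] := List.eq_nil_of_length_eq_zero (Nat.le_zero.mp ht)
    subst ht0
    have hC : pvC [] = [] := rfl
    simp [hC]
  | succ n ihn =>
    intro t ht out
    have hsplit : t.takeWhile (fun c => !(c == ',' || c == '\n'))
        ++ t.dropWhile (fun c => !(c == ',' || c == '\n')) = t :=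
      List.takeWhile_append_dropWhile
    have hufree : ∀ a ∈ t.takeWhile (fun c => !(c == ',' || c == '\n')),
        (a == ',' || a == '\n') = false := by
      intro a ha
      have := List.mem_takeWhile_imp ha
      simpa using this
    cases hrc : t.dropWhile (fun c => !(c == ',' || c == '\n')) with
    | nil =>
      rw [hrc, List.append_nil] at hsplit
      rw [← hsplit, pv_T1 _ hufree out [], pv_C_nosep _ hufree]
    | cons c r =>
      have hne : t.dropWhile (fun c => !(c == ',' || c == '\n')) ≠ [] := by
        rw [hrc]; simp
      have hPc := List.head_dropWhile_not (fun c => !(c == ',' || c == '\n')) hne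
      rw [hrc] at hsplit
      simp only [hrc, List.head_cons, Bool.not_eq_false'] at hPc
      have hlen : r.length ≤ n := by
        have := congrArg List.length hsplit
        simp [List.length_append] at this
        omega
      rw [← hsplit, List.foldl_append, List.foldl_cons]
      have hPc' : c = ',' ∨ c = '\n' := by simpa using hPc
      rcases hPc' with hcc | hcc
      · subst hcc
        have hstep : ∀ st : List Char × List Char × Bool,
            pvCanonStep st ',' = (st.1 ++ [',', ' '], [], false) := by
          intro st; simp [pvCanonStep]
        rw [hstep, ihn r hlen, pv_T1 _ hufree out [], pv_C_comma _ r hufree]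
        simp
      · subst hcc
        have hstep : ∀ st : List Char × List Char × Bool,
            pvCanonStep st '\n' = (st.1 ++ ['\n'], [], false) := by
          intro st; simp [pvCanonStep]
        rw [hstep, ihn r hlen, pv_T1 _ hufree out [], pv_C_nl _ r hufree]
        simp

theorem pv_canon_eq (s : List Char) : pvCanon s = pvNormalizeA s := by
  rw [pv_norm_eq_C]
  unfold pvCanon
  rw [pv_main (PySem.Chars.strip s).length _ le_rfl []]
  rfl

-- ===== VERDICT (by name: the statement is the Claim_ definition above) =====
theorem validate_llm_answer_spec : Claim_equal_validate_llm_answer := by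
  intro answer expected _
  unfold Spec_validate_llm_answer validate_llm_answer validate_llm_answer_alt
  by_cases h : (PySem.Str.find answer "<<<" == -1 || PySem.Str.find answer ">>>" == -1) = true
  · rw [if_pos h, if_pos h]
  · rw [if_neg h, if_neg h]
    simp only [pv_canon_eq]
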